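-- pv_equiv track=rewrite | github.com/lavenderdotpet/LibreQuake | bin/py/e2m6_boss_generator.py | remove_sections_with_string
-- ===== SOURCE A (Python) =====
-- def remove_sections_with_string(data, target_string):
--     stack = []
--     sections_to_remove = []
--
--     for i, char in enumerate(data):
--         if char == '{':
--             stack.append(i)
--         elif char == '}':
--             if stack:
--                 start = stack.pop()
--                 # If the stack is empty after popping, it means we found an outermost section
--                 if not stack:
--                     section = data[start:i+1]
--                     if target_string in section:
--                         sections_to_remove.append((start, i+1))
--
--     # Build the new data excluding sections that need to be removed
--     modified_data = []
--     last_index = 0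
--     for start, end in sections_to_remove:
--         modified_data.append(data[last_index:start])  # Add text before the section
--         last_index = end  # Move the index past the section
--
--     modified_data.append(data[last_index:])  # Add the remaining part of the text
--
--     # Join the list into a final string
--     modified_data = ''.join(modified_data)
--
--     return modified_data
-- ===== SOURCE B (Python) =====
-- def remove_sections_with_string(data, target_string):
--     # Single pass: depth counter + current-section buffer, instead of an index
--     # stack plus a second rebuild-from-indices pass.
--     out = []
--     buf = []
--     depth = 0
--     for ch in data:
--         if depth == 0:
--             if ch == '{':
--                 depth = 1
--                 buf.append(ch)
--             else:
--                 out.append(ch)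
--         else:
--             buf.append(ch)
--             if ch == '{':
--                 depth += 1
--             elif ch == '}':
--                 depth -= 1
--                 if depth == 0:
--                     if target_string not in ''.join(buf):
--                         out.extend(buf)
--                     buf = []
--     out.extend(buf)
--     return ''.join(out)
-- ===== Notes on version B (the rewrite author's own statement) =====
-- stated objective: simpler
-- what changed: A scans with a stack of '{' indices collecting (start,end) pairs of sections to remove and then rebuilds the string in a second slicing pass; B does one merged pass with an integer depth counter and a current-section buffer that is emitted or dropped the moment the top-level section closes, so no index bookkeeping and no second pass.
import Mathlib
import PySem

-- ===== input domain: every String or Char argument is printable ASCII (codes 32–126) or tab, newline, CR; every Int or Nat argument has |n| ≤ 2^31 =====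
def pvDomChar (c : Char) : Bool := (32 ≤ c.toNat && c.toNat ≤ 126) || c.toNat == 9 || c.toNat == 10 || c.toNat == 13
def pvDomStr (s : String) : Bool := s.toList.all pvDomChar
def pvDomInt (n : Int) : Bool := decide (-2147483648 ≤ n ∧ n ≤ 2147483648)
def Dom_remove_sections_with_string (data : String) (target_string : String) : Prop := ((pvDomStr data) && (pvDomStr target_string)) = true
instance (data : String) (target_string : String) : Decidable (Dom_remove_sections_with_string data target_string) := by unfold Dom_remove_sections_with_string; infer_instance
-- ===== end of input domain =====

-- B merges A's index-stack scan + second rebuild pass into one pass with a depth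
-- counter and a section buffer (objective: simpler); proved to return the same string.


-- ===== PORT A =====
-- one step of A's first for-loop (state: stack of '{' indices, sections_to_remove)
def stepA (full tgt : List Char) (st : List Int × List (Int × Int)) (p : Int × Char) :
    List Int × List (Int × Int) :=
  if p.2 = '{' then (p.1 :: st.1, st.2)
  else if p.2 = '}' then
    match st.1 with
    | [] => st
    | start :: rest =>                                   -- start = stack.pop()
      if rest = [] then                                  -- outermost section closed
        if PySem.Chars.isIn tgt (PySem.List.slice full (some start) (some (p.1 + 1))) then
          (rest, st.2 ++ [(start, p.1 + 1)])
        else (rest, st.2)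
      else (rest, st.2)
  else st

def remove_sections_with_string (data : String) (target_string : String) : String :=
  let cs := data.toList
  let res := (PySem.List.enumerate cs 0).foldl (stepA cs target_string.toList) ([], [])
  -- second loop: build modified_data from the (start, end) pairs
  let r2 := res.2.foldl
    (fun (st : List (List Char) × Int) (se : Int × Int) =>
      (st.1 ++ [PySem.List.slice cs (some st.2) (some se.1)], se.2)) ([], 0)
  String.ofList ((r2.1 ++ [PySem.List.slice cs (some r2.2) none]).flatten)

-- ===== PORT B =====
-- one step of B's single loop (state: depth, out, current-section buffer)
def stepB (tgt : List Char) (st : Nat × List Char × List Char) (c : Char) :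
    Nat × List Char × List Char :=
  match st with
  | (0, out, buf) => if c = '{' then (1, out, buf ++ [c]) else (0, out ++ [c], buf)
  | (d+1, out, buf) =>
    let buf := buf ++ [c]
    if c = '{' then (d+2, out, buf)
    else if c = '}' then
      if d = 0 then
        if PySem.Chars.isIn tgt buf then (0, out, [])
        else (0, out ++ buf, [])
      else (d, out, buf)
    else (d+1, out, buf)

def remove_sections_with_string_alt (data : String) (target_string : String) : String :=
  let r := data.toList.foldl (stepB target_string.toList) (0, [], [])
  String.ofList (r.2.1 ++ r.2.2)

-- ===== PRECONDITION & SPEC =====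
def Spec_remove_sections_with_string (data : String) (target_string : String) (out : String) : Prop := out = remove_sections_with_string_alt data target_string
instance (data : String) (target_string : String) (out : String) : Decidable (Spec_remove_sections_with_string data target_string out) := by unfold Spec_remove_sections_with_string; infer_instance

-- ===== CLAIM (what is proved, stated in full; the proofs are below) =====
def Claim_equal_remove_sections_with_string : Prop := ∀ (data : String) (target_string : String), Dom_remove_sections_with_string data target_string → Spec_remove_sections_with_string data target_string (remove_sections_with_string data target_string)

-- ===== LEMMAS AND PROOFS =====

-- slice of full between nat positions a ≤ b
def seg (full : List Char) (a b : Nat) : List Char := (full.drop a).take (b - a)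

-- Nat-indexed recursion equal to A's first foldl over enumerate
def loopA (full tgt : List Char) : List Char → Nat → List Nat → List (Nat × Nat) → List Nat × List (Nat × Nat)
  | [], _, stack, secs => (stack, secs)
  | c :: cs, n, stack, secs =>
    if c = '{' then loopA full tgt cs (n+1) (n :: stack) secs
    else if c = '}' then
      match stack with
      | [] => loopA full tgt cs (n+1) [] secs
      | s :: rest =>
        if rest = [] then
          if PySem.Chars.isIn tgt (seg full s (n+1)) then loopA full tgt cs (n+1) rest (secs ++ [(s, n+1)])
          else loopA full tgt cs (n+1) rest secs
        else loopA full tgt cs (n+1) rest secs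
    else loopA full tgt cs (n+1) stack secs

-- recursion equal to B's foldl: output contributed by the remaining characters
def loopB (tgt : List Char) : List Char → Nat → List Char → List Char
  | [], _, buf => buf
  | c :: cs, 0, _ => if c = '{' then loopB tgt cs 1 [c] else c :: loopB tgt cs 0 []
  | c :: cs, d+1, buf =>
    if c = '{' then loopB tgt cs (d+2) (buf ++ [c])
    else if c = '}' then
      if d = 0 then
        if PySem.Chars.isIn tgt (buf ++ [c]) then loopB tgt cs 0 []
        else (buf ++ [c]) ++ loopB tgt cs 0 []
      else loopB tgt cs d (buf ++ [c])
    else loopB tgt cs (d+1) (buf ++ [c])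

-- A's rebuild phase, recursively
def rebuildR (full : List Char) : Nat → List (Nat × Nat) → List Char
  | last, [] => full.drop last
  | last, (s, e) :: rest => seg full last s ++ rebuildR full e rest

def castPair (p : Nat × Nat) : Int × Int := ((p.1 : Int), (p.2 : Int))

theorem seg_self (full : List Char) (a : Nat) : seg full a a = [] := by simp [seg]

theorem drop_eq_seg_append (full : List Char) {a b : Nat} (hab : a ≤ b) (hb : b ≤ full.length) :
    full.drop a = seg full a b ++ full.drop b := by
  unfold seg
  conv_lhs => rw [← List.take_append_drop (b - a) (full.drop a)]
  rw [List.drop_drop]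
  congr 2
  omega

theorem length_seg (full : List Char) {a b : Nat} (hab : a ≤ b) (hb : b ≤ full.length) :
    (seg full a b).length = b - a := by
  simp [seg]; omega

theorem seg_append (full : List Char) {a b c : Nat} (hab : a ≤ b) (hbc : b ≤ c) (hb : b ≤ full.length) :
    seg full a b ++ seg full b c = seg full a c := by
  have h1 := drop_eq_seg_append full hab hb
  have h0 : seg full a c = ((seg full a b ++ full.drop b)).take (c - a) := by
    rw [seg, h1]
  rw [h0, List.take_append, length_seg full hab hb,
    List.take_of_length_le (by rw [length_seg full hab hb]; omega)]
  have h2 : c - a - (b - a) = c - b := by omega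
  rw [h2]
  rfl

theorem seg_snoc (full : List Char) {a n : Nat} {c : Char} {cs : List Char}
    (h : full.drop n = c :: cs) (han : a ≤ n) :
    seg full a (n + 1) = seg full a n ++ [c] := by
  have hn : n < full.length := by
    by_contra hc
    rw [List.drop_eq_nil_of_le (by omega)] at h; simp at h
  rw [← seg_append full han (Nat.le_succ n) (by omega)]
  congr 1
  unfold seg
  rw [h]
  simp

theorem seg_full (full : List Char) {a : Nat} :
    seg full a full.length = full.drop a := by
  unfold seg
  exact List.take_of_length_le (by simp)

-- A's first foldl over enumerate equals the Nat-indexed loopA (indices are casts)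
theorem foldA_eq (full tgt : List Char) :
    ∀ (cs : List Char) (n : Nat) (stack : List Nat) (secs : List (Nat × Nat)),
    (PySem.List.enumerate cs (n : Int)).foldl (stepA full tgt) (stack.map Nat.cast, secs.map castPair)
      = ((loopA full tgt cs n stack secs).1.map Nat.cast, (loopA full tgt cs n stack secs).2.map castPair) := by
  intro cs
  induction cs with
  | nil => intro n stack secs; simp [PySem.List.enumerate_nil, loopA]
  | cons c cs ih =>
    intro n stack secs
    rw [PySem.List.enumerate_cons]
    show List.foldl _ (stepA full tgt (stack.map Nat.cast, secs.map castPair) ((n : Int), c)) _ = _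
    by_cases hl : c = '{'
    · have : ((n : Int) + 1) = ((n + 1 : Nat) : Int) := by push_cast; ring
      rw [this]
      simp only [stepA, hl, loopA]
      exact ih (n + 1) (n :: stack) secs
    · by_cases hr : c = '}'
      · have hcast : ((n : Int) + 1) = ((n + 1 : Nat) : Int) := by push_cast; ring
        simp only [stepA, hl, hr, if_neg hl, if_pos rfl, loopA, hcast]
        cases stack with
        | nil => simpa using ih (n + 1) [] secs
        | cons s rest =>
          simp only [List.map_cons]
          by_cases hrest : rest = []
          · subst hrest
            simp only [List.map_nil, if_pos rfl]
            have hslice : PySem.List.slice full (some ((s : Nat) : Int)) (some (((n + 1 : Nat)) : Int))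
                = seg full s (n + 1) := by
              rw [PySem.List.slice_natCast]; rfl
            rw [hslice]
            by_cases hin : PySem.Chars.isIn tgt (seg full s (n + 1))
            · simp only [if_pos hin]
              have := ih (n + 1) [] (secs ++ [(s, n + 1)])
              simpa [castPair] using this
            · simp only [if_neg hin]
              simpa using ih (n + 1) [] secs
          · have hrest' : rest.map (Nat.cast : Nat → Int) ≠ [] := by
              simpa using hrest
            simp only [if_neg hrest', if_neg hrest]
            exact ih (n + 1) rest secs
      · simp only [stepA, hl, hr, if_neg hl, if_neg hr, loopA]
        have : ((n : Int) + 1) = ((n + 1 : Nat) : Int) := by push_cast; ring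
        rw [this]
        exact ih (n + 1) stack secs

-- loopA's secs argument is a pure accumulator
theorem loopA_acc (full tgt : List Char) :
    ∀ (cs : List Char) (n : Nat) (stack : List Nat) (secs : List (Nat × Nat)),
    (loopA full tgt cs n stack secs).2 = secs ++ (loopA full tgt cs n stack []).2 := by
  intro cs
  induction cs with
  | nil => intro n stack secs; simp [loopA]
  | cons c cs ih =>
    intro n stack secs
    by_cases hl : c = '{'
    · simp only [loopA, if_pos hl]; rw [ih, ih _ (n :: stack) []]
    · by_cases hr : c = '}'
      · simp only [loopA, if_neg hl, if_pos hr]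
        cases stack with
        | nil => rw [ih, ih _ [] []]
        | cons s rest =>
          by_cases hrest : rest = []
          · subst hrest
            simp only [if_pos rfl]
            by_cases hin : PySem.Chars.isIn tgt (seg full s (n + 1)) = true
            · simp only [hin, if_true, List.nil_append]
              rw [ih, ih _ [] [(s, n + 1)]]
              simp
            · simp only [hin, if_true, Bool.false_eq_true, if_false]
              rw [ih, ih _ [] []]
          · simp only [if_neg hrest]; rw [ih, ih _ rest []]
      · simp only [loopA, if_neg hl, if_neg hr]; rw [ih, ih _ stack []]

-- A's rebuild foldl equals rebuildR
theorem rebuild_eq (full : List Char) :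
    ∀ (secs : List (Nat × Nat)) (pieces : List (List Char)) (last : Nat),
    (let r2 := (secs.map castPair).foldl
        (fun (st : List (List Char) × Int) (se : Int × Int) =>
          (st.1 ++ [PySem.List.slice full (some st.2) (some se.1)], se.2)) (pieces, (last : Int));
      (r2.1 ++ [PySem.List.slice full (some r2.2) none]).flatten)
    = pieces.flatten ++ rebuildR full last secs := by
  intro secs
  induction secs with
  | nil =>
    intro pieces last
    simp only [List.map_nil, List.foldl_nil, rebuildR]
    rw [PySem.List.slice_from_natCast]
    simp
  | cons se rest ih =>
    intro pieces last
    obtain ⟨s, e⟩ := se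
    simp only [List.map_cons, List.foldl_cons, castPair]
    have := ih (pieces ++ [PySem.List.slice full (some (last : Int)) (some (s : Int))]) e
    simp only at this
    rw [this]
    rw [PySem.List.slice_natCast]
    simp only [rebuildR, seg]
    simp [List.append_assoc]

-- B's foldl equals loopB (out is threaded through; buf is empty whenever depth is 0)
theorem foldB_eq (tgt : List Char) :
    ∀ (cs : List Char) (d : Nat) (out buf : List Char), (d = 0 → buf = []) →
    (cs.foldl (stepB tgt) (d, out, buf)).2.1 ++ (cs.foldl (stepB tgt) (d, out, buf)).2.2
      = out ++ loopB tgt cs d buf := by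
  intro cs
  induction cs with
  | nil => intro d out buf h; simp [loopB]
  | cons c cs ih =>
    intro d out buf h
    simp only [List.foldl_cons]
    cases d with
    | zero =>
      have hbuf : buf = [] := h rfl
      subst hbuf
      by_cases hl : c = '{'
      · subst hl
        simp only [stepB, if_pos rfl, loopB, List.nil_append]
        exact ih 1 out ['{'] (by omega)
      · simp only [stepB, if_neg hl, loopB, if_neg hl]
        rw [ih 0 (out ++ [c]) [] (fun _ => rfl)]
        simp
    | succ d =>
      by_cases hl : c = '{'
      · simp only [stepB, if_pos hl, loopB, if_pos hl]
        rw [ih (d+2) out (buf ++ [c]) (by omega)]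
      · by_cases hr : c = '}'
        · simp only [stepB, if_neg hl, if_pos hr, loopB, if_neg hl, if_pos hr]
          cases d with
          | zero =>
            simp only [if_pos rfl]
            by_cases hin : PySem.Chars.isIn tgt (buf ++ [c])
            · simp only [if_pos hin, if_true]
              rw [ih 0 out [] (fun _ => rfl)]
            · simp only [if_neg hin, if_true]
              rw [ih 0 (out ++ (buf ++ [c])) [] (fun _ => rfl)]
              simp
          | succ d =>
            have hd : ¬ (d + 1 = 0) := by omega
            simp only [if_neg hd]
            rw [ih (d+1) out (buf ++ [c]) (by omega)]
        · simp only [stepB, if_neg hl, if_neg hr, loopB, if_neg hl, if_neg hr]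
          rw [ih (d+1) out (buf ++ [c]) (by omega)]

-- MAIN invariant: A's removed-sections list, rebuilt, equals B's remaining output
theorem main_inv (full tgt : List Char) :
    ∀ (cs : List Char) (n : Nat) (stack : List Nat) (last s0 : Nat),
    full.drop n = cs → n ≤ full.length →
    ((stack = [] ∧ s0 = n) ∨ stack.getLast? = some s0) → last ≤ s0 → s0 ≤ n →
    rebuildR full last (loopA full tgt cs n stack []).2
      = seg full last s0 ++
        (if stack = [] then loopB tgt cs 0 [] else loopB tgt cs stack.length (seg full s0 n)) := by
  intro cs
  induction cs with
  | nil =>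
    intro n stack last s0 hdrop hn hstk hlast hs0
    have hnL : n = full.length := by
      have := List.drop_eq_nil_iff.mp hdrop
      omega
    subst hnL
    simp only [loopA, rebuildR]
    have hfull : List.drop last full = seg full last full.length := (seg_full full).symm
    cases stack with
    | nil =>
      have hs0' : s0 = full.length := by
        rcases hstk with ⟨-, h⟩ | h
        · exact h
        · simp at h
      subst hs0'
      rw [hfull, if_pos rfl]
      simp [loopB]
    | cons x rest =>
      rw [hfull, ← seg_append full hlast hs0 hs0, if_neg (by simp : (x :: rest : List Nat) ≠ [])]
      rcases h : (x :: rest).length with - | k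
      · simp at h
      · simp [loopB]
  | cons c cs ih =>
    intro n stack last s0 hdrop hn hstk hlast hs0
    have hnlt : n < full.length := by
      by_contra hc
      rw [List.drop_eq_nil_of_le (by omega)] at hdrop; simp at hdrop
    have hdrop' : full.drop (n + 1) = cs := by
      have h2 := congrArg (List.drop 1) hdrop
      rw [List.drop_drop] at h2
      simpa [Nat.add_comm] using h2
    by_cases hl : c = '{'
    · subst hl
      simp only [loopA, if_true]
      cases stack with
      | nil =>
        have hs0n : s0 = n := by
          rcases hstk with ⟨-, h⟩ | h
          · exact h
          · simp at h
        rw [hs0n, if_pos rfl,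
            ih (n+1) [n] last n hdrop' (by omega) (Or.inr (by simp)) (by omega) (by omega),
            if_neg (by simp : ([n] : List Nat) ≠ [])]
        have hseg : seg full n (n + 1) = ['{'] := by
          have h := seg_snoc full hdrop (le_refl n)
          rwa [seg_self, List.nil_append] at h
        rw [hseg]
        simp [loopB]
      | cons x rest =>
        have hgl : (x :: rest).getLast? = some s0 := by
          rcases hstk with ⟨h, -⟩ | h
          · exact absurd h (by simp)
          · exact h
        have hgl' : (n :: x :: rest).getLast? = some s0 := by
          rw [List.getLast?_cons_cons]; exact hgl
        rw [ih (n+1) (n :: x :: rest) last s0 hdrop' (by omega) (Or.inr hgl') hlast (by omega)]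
        rw [if_neg (by simp : (n :: x :: rest : List Nat) ≠ []),
            if_neg (by simp : (x :: rest : List Nat) ≠ [])]
        rw [seg_snoc full hdrop hs0]
        simp [loopB]
    · by_cases hr : c = '}'
      · subst hr
        simp only [loopA, if_true]
        rw [if_neg hl]
        cases stack with
        | nil =>
          have hs0n : s0 = n := by
            rcases hstk with ⟨-, h⟩ | h
            · exact h
            · simp at h
          rw [hs0n, if_pos rfl,
              ih (n+1) [] last (n+1) hdrop' (by omega) (Or.inl ⟨rfl, rfl⟩) (by omega) le_rfl,
              if_pos rfl, seg_snoc full hdrop (by omega)]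
          simp [loopB, hl]
        | cons x rest =>
          have hgl : (x :: rest).getLast? = some s0 := by
            rcases hstk with ⟨h, -⟩ | h
            · exact absurd h (by simp)
            · exact h
          simp only []
          by_cases hrest : rest = []
          · subst hrest
            have hxs0 : x = s0 := by simpa using hgl
            subst hxs0
            rw [if_pos rfl]
            have hbufc : seg full x n ++ ['}'] = seg full x (n + 1) :=
              (seg_snoc full hdrop hs0).symm
            by_cases hin : PySem.Chars.isIn tgt (seg full x (n + 1)) = true
            · rw [if_pos hin]
              simp only [List.nil_append]
              rw [loopA_acc full tgt cs (n+1) [] [(x, n+1)]]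
              simp only [List.singleton_append, rebuildR]
              rw [ih (n+1) [] (n+1) (n+1) hdrop' (by omega) (Or.inl ⟨rfl, rfl⟩) le_rfl le_rfl]
              rw [if_pos rfl, if_neg (by simp : ([x] : List Nat) ≠ [])]
              rw [seg_self]
              simp only [List.nil_append, List.length_cons, List.length_nil]
              rw [show loopB tgt ('}' :: cs) (0 + 1) (seg full x n)
                    = loopB tgt cs 0 [] from by
                simp only [loopB, if_neg hl, if_true]
                rw [hbufc, if_pos hin]]
            · rw [if_neg hin]
              rw [ih (n+1) [] last (n+1) hdrop' (by omega) (Or.inl ⟨rfl, rfl⟩) (by omega) le_rfl]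
              rw [if_pos rfl, if_neg (by simp : ([x] : List Nat) ≠ [])]
              simp only [List.length_cons, List.length_nil]
              rw [show loopB tgt ('}' :: cs) (0 + 1) (seg full x n)
                    = seg full x (n + 1) ++ loopB tgt cs 0 [] from by
                simp only [loopB, if_neg hl, if_true]
                rw [hbufc, if_neg hin]]
              rw [← List.append_assoc, seg_append full hlast (by omega) (by omega)]
          · obtain ⟨y, rest', rfl⟩ : ∃ y rest', rest = y :: rest' := by
              cases rest with
              | nil => exact absurd rfl hrest
              | cons y r => exact ⟨y, r, rfl⟩
            have hgl' : (y :: rest').getLast? = some s0 := by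
              rw [List.getLast?_cons_cons] at hgl; exact hgl
            rw [if_neg hrest]
            rw [ih (n+1) (y :: rest') last s0 hdrop' (by omega) (Or.inr hgl') hlast (by omega)]
            rw [if_neg (by simp : (x :: y :: rest' : List Nat) ≠ []),
                if_neg (by simp : (y :: rest' : List Nat) ≠ [])]
            rw [seg_snoc full hdrop hs0]
            simp only [List.length_cons]
            rw [show loopB tgt ('}' :: cs) (rest'.length + 1 + 1) (seg full s0 n)
                  = loopB tgt cs (rest'.length + 1) (seg full s0 n ++ ['}']) from by
              simp only [loopB, if_neg hl, if_true]
              rw [if_neg (by omega : ¬(rest'.length + 1 = 0))]]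
      · simp only [loopA]
        rw [if_neg hl, if_neg hr]
        cases stack with
        | nil =>
          have hs0n : s0 = n := by
            rcases hstk with ⟨-, h⟩ | h
            · exact h
            · simp at h
          rw [hs0n, if_pos rfl,
              ih (n+1) [] last (n+1) hdrop' (by omega) (Or.inl ⟨rfl, rfl⟩) (by omega) le_rfl,
              if_pos rfl, seg_snoc full hdrop (by omega)]
          simp [loopB, hl]
        | cons x rest =>
          have hgl : (x :: rest).getLast? = some s0 := by
            rcases hstk with ⟨h, -⟩ | h
            · exact absurd h (by simp)
            · exact h
          rw [ih (n+1) (x :: rest) last s0 hdrop' (by omega) (Or.inr hgl) hlast (by omega)]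
          rw [if_neg (by simp : (x :: rest : List Nat) ≠ []),
              if_neg (by simp : (x :: rest : List Nat) ≠ [])]
          rw [seg_snoc full hdrop hs0]
          simp only [List.length_cons]
          rw [show loopB tgt (c :: cs) (rest.length + 1) (seg full s0 n)
                = loopB tgt cs (rest.length + 1) (seg full s0 n ++ [c]) from by
            simp only [loopB, if_neg hl, if_neg hr]]

-- ===== VERDICT (by name: the statement is the Claim_ definition above) =====
theorem remove_sections_with_string_spec : Claim_equal_remove_sections_with_string := by
  intro data target_string _
  unfold Spec_remove_sections_with_string remove_sections_with_string remove_sections_with_string_alt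
  dsimp only
  set full := data.toList with hfull
  set tgt := target_string.toList with htgt
  have hA := foldA_eq full tgt full 0 [] []
  simp only [List.map_nil, Nat.cast_zero] at hA
  rw [hA]
  have hR := rebuild_eq full (loopA full tgt full 0 [] []).2 [] 0
  simp only [List.flatten_nil, List.nil_append, Nat.cast_zero] at hR
  rw [hR]
  have hM := main_inv full tgt full 0 [] 0 0 rfl (by omega) (Or.inl ⟨rfl, rfl⟩) le_rfl le_rfl
  simp only [seg_self, List.nil_append, if_true] at hM
  rw [hM]
  have hB := foldB_eq tgt full 0 [] [] (fun _ => rfl)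
  simp only [List.nil_append] at hB
  rw [← hB]
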